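-- pv_equiv track=rewrite | github.com/Murf-y/Coding_challenges | weeklychallenge28.py | solution
-- ===== SOURCE A (Python) =====
-- def D(b):
--     for i in range(b):x=len([i for i in range(1,b+1) if not b%i])
--     return x
--
-- def W(lst,i,j,s=0):
--     for x in range(0,j+1):
--         if lst[x]>i:s+=1
--     return s
--
-- def solution(n):
--     X=[]
--     Z=[]
--     for j in range(1,n+1):
--         X.append(D(j))
--     x=0
--     for i in X:
--         Z.append(W(X,i,x))
--         x+=1
--     Z.sort()
--     r=[max(Z),Z.count(max(Z))]
--     return r
-- ===== SOURCE B (Python) =====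
-- def solution(n):
--     # Sieve of divisor counts (one pass over multiples instead of trial division
--     # per number), then a single left-to-right pass that keeps a counter of the
--     # values seen so far to get each "greater-than-before" statistic, tracking
--     # the running maximum and its multiplicity without sorting.
--     counts = [0] * (n + 1)
--     for d in range(1, n + 1):
--         for m in range(d, n + 1, d):
--             counts[m] += 1
--     best, cnt = -1, 0
--     seen = {}
--     for v in counts[1:]:
--         w = sum(c for u, c in seen.items() if u > v)
--         if w > best:
--             best, cnt = w, 1
--         elif w == best:
--             cnt += 1
--         seen[v] = seen.get(v, 0) + 1
--     return [best, cnt]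
-- ===== Notes on version B (the rewrite author's own statement) =====
-- stated objective: faster
-- what changed: A recomputes each divisor count b times by trial division (O(n^3)) and then does a quadratic greater-than-so-far pass plus a sort; B gets all divisor counts with one multiples sieve and computes the statistic in a single pass keeping a counter of seen values and a running (max, multiplicity), with no sort.
import Mathlib
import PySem

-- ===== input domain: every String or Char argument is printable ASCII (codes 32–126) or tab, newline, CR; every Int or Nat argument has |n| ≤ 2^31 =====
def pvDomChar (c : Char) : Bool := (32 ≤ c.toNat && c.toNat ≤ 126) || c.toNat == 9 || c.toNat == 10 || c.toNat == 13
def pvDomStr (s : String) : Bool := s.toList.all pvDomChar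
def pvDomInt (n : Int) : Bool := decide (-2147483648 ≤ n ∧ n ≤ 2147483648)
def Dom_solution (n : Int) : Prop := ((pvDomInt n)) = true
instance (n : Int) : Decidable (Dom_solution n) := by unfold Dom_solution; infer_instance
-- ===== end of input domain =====

-- B replaces A's per-number trial division (recomputed b times per number) by one divisor-count
-- sieve and replaces A's quadratic rank pass + sort by a single counter-driven pass with a running
-- maximum; objective: faster.

-- ===== PORT A =====
-- len([i for i in range(1,b+1) if not b%i])
def pvDivLen (b : Int) : Int :=
  PySem.List.len ((PySem.List.pyRange 1 (b + 1) 1).filter (fun i => PySem.Int.mod b i == 0))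

-- D's loop rebinds x on every iteration; the initial 0 is never observed because solution only
-- calls D with b ≥ 1 (for b ≤ 0 Python's D would raise UnboundLocalError, unreachable here)
def pvD (b : Int) : Int :=
  (PySem.List.pyRange 0 b 1).foldl (fun _ _ => pvDivLen b) 0

def pvW (lst : List Int) (i : Int) (j : Int) : Int :=
  (PySem.List.pyRange 0 (j + 1) 1).foldl
    (fun s x => if PySem.List.pyGetD lst x 0 > i then s + 1 else s) 0

def solution (n : Int) : List Int :=
  let X := (PySem.List.pyRange 1 (n + 1) 1).foldl (fun acc j => acc ++ [pvD j]) []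
  let Z := (X.foldl (fun (p : List Int × Int) i => (p.1 ++ [pvW X i p.2], p.2 + 1)) ([], 0)).1
  let Zs := PySem.List.sorted Z (fun x => x) false
  let m := (PySem.List.max? Zs (fun x => x)).getD 0   -- max([]) raises ValueError: Pre_ gives n ≥ 1
  [m, (PySem.List.count Zs m : Int)]

-- ===== PORT B =====
def solution_alt (n : Int) : List Int :=
  let counts := (PySem.List.pyRange 1 (n + 1) 1).foldl
    (fun c d => (PySem.List.pyRange d (n + 1) d).foldl
      (fun c m => PySem.List.pySetD c m (PySem.List.pyGetD c m 0 + 1)) c)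
    (List.replicate (n + 1).toNat (0 : Int))
  let fin := (PySem.List.slice counts (some 1) none).foldl
    (fun (st : Int × Int × PySem.Dict Int Int) v =>
      let w := (((PySem.Dict.items st.2.2).filter (fun p => decide (p.1 > v))).map (·.2)).sum
      if w > st.1 then (w, 1, st.2.2.insert v (st.2.2.getD v 0 + 1))
      else if w = st.1 then (st.1, st.2.1 + 1, st.2.2.insert v (st.2.2.getD v 0 + 1))
      else (st.1, st.2.1, st.2.2.insert v (st.2.2.getD v 0 + 1)))
    (-1, 0, PySem.Dict.empty)
  [fin.1, fin.2.1]

-- ===== PRECONDITION & SPEC =====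
-- A raises ValueError (max of an empty sequence) for n ≤ 0; those inputs are excluded.
def Pre_solution (n : Int) : Prop := 1 ≤ n
instance (n : Int) : Decidable (Pre_solution n) := by unfold Pre_solution; infer_instance
def pvWitness_solution : Int := (5)

def Spec_solution (n : Int) (out : List Int) : Prop := out = solution_alt n
instance (n : Int) (out : List Int) : Decidable (Spec_solution n out) := by unfold Spec_solution; infer_instance

-- ===== CLAIM (what is proved, stated in full; the proofs are below) =====
def Claim_equal_solution : Prop := ∀ (n : Int), Dom_solution n → Pre_solution n → Spec_solution n (solution n)

-- ===== LEMMAS AND PROOFS =====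

-- the divisor-count spec both ports are reduced to
def pvDC (j : Int) : Int :=
  ((PySem.List.pyRange 1 (j + 1) 1).countP (fun i => PySem.Int.mod j i == 0) : Int)

-- z-values of L given the already-seen prefix P (the common spec of A's W pass and B's counter pass)
def pvZ (P : List Int) : List Int → List Int
  | [] => []
  | v :: L => ((P.countP (fun y => decide (v < y)) : Nat) : Int) :: pvZ (P ++ [v]) L

-- the running (max, multiplicity) step
def pvMC (p : Int × Int) (w : Int) : Int × Int :=
  if w > p.1 then (w, 1) else if w = p.1 then (p.1, p.2 + 1) else p

lemma pv_foldl_const {α : Type} (c a : Int) (l : List α) (h : l ≠ []) :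
    l.foldl (fun _ _ => c) a = c := by
  induction l generalizing a with
  | nil => simp at h
  | cons x t ih =>
    cases t with
    | nil => simp
    | cons y t' => simpa using ih c (by simp)

lemma pvD_eq (b : Int) (h : 1 ≤ b) : pvD b = pvDivLen b := by
  unfold pvD
  rw [PySem.List.pyRange_one_cons (by omega)]
  exact pv_foldl_const _ _ _ (by simp)

lemma pvDivLen_eq (b : Int) : pvDivLen b = pvDC b := by
  simp [pvDivLen, pvDC, PySem.List.len_eq, List.countP_eq_length_filter]

-- countP of an index range reading xs is countP of the prefix
lemma pv_countP_range_getD (X : List Int) (q : Int → Bool) :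
    ∀ m, m ≤ X.length → (List.range m).countP (fun k => q (X.getD k 0)) = (X.take m).countP q := by
  intro m hm
  induction m with
  | zero => simp
  | succ m ih =>
    rw [List.range_succ, List.countP_append, ih (by omega), List.take_add_one,
        List.countP_append]
    have hg : X[m]? = some X[m] := List.getElem?_eq_getElem (by omega)
    have hd : X.getD m 0 = X[m] := List.getD_eq_getElem X 0 (by omega)
    simp [hg, List.countP_cons]

lemma pvW_prefix (P : List Int) (v : Int) (L : List Int) :
    pvW (P ++ v :: L) v (P.length : Int) = ((P.countP (fun y => decide (v < y)) : Nat) : Int) := by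
  unfold pvW
  rw [PySem.List.foldl_ite_add_one (p := fun x => PySem.List.pyGetD (P ++ v :: L) x 0 > v)]
  have h1 : (P.length : Int) + 1 = ((P.length + 1 : Nat) : Int) := by push_cast; ring
  rw [h1, PySem.List.pyRange_one, List.countP_map]
  have h2 : (((P.length + 1 : Nat) : Int) - 0).toNat = P.length + 1 := by omega
  rw [h2]
  have h3 : ((List.range (P.length + 1)).countP
      ((fun x => decide (PySem.List.pyGetD (P ++ v :: L) x 0 > v)) ∘ fun k => (0 : Int) + ↑k)) =
      ((List.range (P.length + 1)).countP (fun k => decide (v < (P ++ v :: L).getD k 0))) := by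
    apply List.countP_congr
    intro k _
    simp [PySem.List.pyGetD_natCast, GT.gt]
  rw [h3, pv_countP_range_getD (P ++ v :: L) (fun y => decide (v < y)) (P.length + 1) (by simp)]
  have h4 : (P ++ v :: L).take (P.length + 1) = P ++ [v] := by
    have : P ++ v :: L = (P ++ [v]) ++ L := by simp
    rw [this, List.take_left' (by simp)]
  rw [h4, List.countP_append]
  simp

lemma pv_foldA (X : List Int) : ∀ (L : List Int) (Z0 : List Int) (x0 : Int),
    (L.foldl (fun (p : List Int × Int) i => (p.1 ++ [pvW X i p.2], p.2 + 1)) (Z0, x0)) =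
      (Z0 ++ (PySem.List.enumerate L x0).map (fun q => pvW X q.2 q.1), x0 + L.length) := by
  intro L
  induction L with
  | nil => intro Z0 x0; simp [PySem.List.enumerate_nil]
  | cons v L ih =>
    intro Z0 x0
    simp only [List.foldl_cons, PySem.List.enumerate_cons, List.map_cons, List.length_cons]
    rw [ih]
    refine Prod.ext ?_ ?_
    · simp
    · push_cast; ring

lemma pv_enum_Z : ∀ (L P : List Int),
    (PySem.List.enumerate L (P.length : Int)).map (fun q => pvW (P ++ L) q.2 q.1) = pvZ P L := by
  intro L
  induction L with
  | nil => intro P; simp [pvZ, PySem.List.enumerate_nil]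
  | cons v L ih =>
    intro P
    rw [PySem.List.enumerate_cons, List.map_cons, pvZ]
    congr 1
    · exact pvW_prefix P v L
    · have hlen : (P.length : Int) + 1 = (((P ++ [v]).length : Nat) : Int) := by simp
      have hX : P ++ v :: L = (P ++ [v]) ++ L := by simp
      rw [hlen, hX]
      exact ih (P ++ [v])

lemma pvZ_length : ∀ (L P : List Int), (pvZ P L).length = L.length := by
  intro L
  induction L with
  | nil => intro P; simp [pvZ]
  | cons v L ih => intro P; simp [pvZ, ih]

lemma pvZ_nonneg : ∀ (L P : List Int), ∀ y ∈ pvZ P L, 0 ≤ y := by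
  intro L
  induction L with
  | nil => intro P y hy; simp [pvZ] at hy
  | cons v L ih =>
    intro P y hy
    rw [pvZ] at hy
    rcases List.mem_cons.1 hy with h | h
    · subst h; positivity
    · exact ih (P ++ [v]) y h

-- A's tail (sort, max, count) equals the running-maximum form
lemma pv_final_A (Z : List Int) (hne : Z ≠ []) (hnn : ∀ y ∈ Z, 0 ≤ y) :
    [(PySem.List.max? (PySem.List.sorted Z (fun x => x) false) (fun x => x)).getD 0,
     (PySem.List.count (PySem.List.sorted Z (fun x => x) false)
        ((PySem.List.max? (PySem.List.sorted Z (fun x => x) false) (fun x => x)).getD 0) : Int)] =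
    [Z.foldl max (-1), (Z.count (Z.foldl max (-1)) : Int)] := by
  have hperm : (PySem.List.sorted Z (fun x => x) false).Perm Z := PySem.List.sorted_perm Z _ false
  have hZsne : PySem.List.sorted Z (fun x => x) false ≠ [] := by
    intro h
    exact hne (List.eq_nil_of_length_eq_zero (by rw [← hperm.length_eq, h]; rfl))
  obtain ⟨m, hm⟩ : ∃ m, PySem.List.max? (PySem.List.sorted Z (fun x => x) false) (fun x => x) = some m := by
    cases hmx : PySem.List.max? (PySem.List.sorted Z (fun x => x) false) (fun x => x) with
    | none => exact absurd ((PySem.List.max?_eq_none_iff _ _).1 hmx) hZsne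
    | some m => exact ⟨m, rfl⟩
  have hub : ∀ y ∈ Z, y ≤ Z.foldl max (-1) := (PySem.List.le_foldl_max Z (-1)).2
  have hMmem : Z.foldl max (-1) ∈ Z := by
    rcases PySem.List.foldl_max_mem Z (-1) with h | h
    · obtain ⟨z, hz⟩ := List.exists_mem_of_ne_nil Z hne
      have h1 := hnn z hz
      have h2 := hub z hz
      omega
    · exact h
  have hmZ : m ∈ Z := hperm.mem_iff.1 (PySem.List.max?_mem hm)
  have hmM : m = Z.foldl max (-1) :=
    le_antisymm (hub m hmZ) (PySem.List.max?_isMax hm _ (hperm.mem_iff.2 hMmem))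
  rw [hm]
  simp only [Option.getD_some, hmM, PySem.List.count_eq, hperm.count_eq]

-- the streaming (max, multiplicity) fold
lemma pv_stream (zl : List Int) :
    zl.foldl pvMC (-1, 0) = (zl.foldl max (-1), (zl.count (zl.foldl max (-1)) : Int)) := by
  induction zl using List.reverseRecOn with
  | nil => simp
  | append_singleton zl w ih =>
    rw [List.foldl_append, List.foldl_append, ih]
    simp only [List.foldl_cons, List.foldl_nil]
    set M := zl.foldl max (-1) with hM
    by_cases h1 : M < w
    · have hw : w ∉ zl := fun hmem =>
        absurd ((PySem.List.le_foldl_max zl (-1)).2 w hmem) (by omega)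
      have hc : List.count w zl = 0 := List.count_eq_zero.2 hw
      simp [pvMC, h1, max_eq_right (le_of_lt h1), List.count_append, hc]
    · by_cases h2 : w = M
      · subst h2
        simp [pvMC, List.count_append, max_self]
      · have h3 : w < M := by omega
        have hmax : max M w = M := max_eq_left (le_of_lt h3)
        simp [pvMC, not_lt.2 (le_of_lt h3), h2, hmax, List.count_append]

-- one sieve pass: each in-range index in ms (distinct) is incremented once
lemma pv_incr_fold (ms : List Int) : ∀ (c : List Int), ms.Nodup →
    (∀ m ∈ ms, 0 ≤ m ∧ m < (c.length : Int)) →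
    (ms.foldl (fun c m => PySem.List.pySetD c m (PySem.List.pyGetD c m 0 + 1)) c).length = c.length ∧
    ∀ k : Nat, k < c.length →
      (ms.foldl (fun c m => PySem.List.pySetD c m (PySem.List.pyGetD c m 0 + 1)) c).getD k 0 =
        c.getD k 0 + (if (k : Int) ∈ ms then 1 else 0) := by
  induction ms with
  | nil => intro c _ _; exact ⟨rfl, by intro k hk; simp⟩
  | cons m ms ih =>
    intro c hnd hin
    obtain ⟨hm0, hmlt⟩ := hin m (List.mem_cons_self)
    have hset : PySem.List.pySetD c m (PySem.List.pyGetD c m 0 + 1)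
        = c.set m.toNat (PySem.List.pyGetD c m 0 + 1) := PySem.List.pySetD_of_nonneg c _ hm0
    have hmn : m.toNat < c.length := by omega
    have hlen1 : (c.set m.toNat (PySem.List.pyGetD c m 0 + 1)).length = c.length := by simp
    have hnds := (List.nodup_cons.1 hnd).2
    have hmns : m ∉ ms := (List.nodup_cons.1 hnd).1
    have hin' : ∀ x ∈ ms, 0 ≤ x ∧ x < ((c.set m.toNat (PySem.List.pyGetD c m 0 + 1)).length : Int) := by
      intro x hx; rw [hlen1]; exact hin x (List.mem_cons_of_mem _ hx)
    obtain ⟨ihl, ihg⟩ := ih (c.set m.toNat (PySem.List.pyGetD c m 0 + 1)) hnds hin'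
    simp only [List.foldl_cons, hset]
    refine ⟨by rw [ihl, hlen1], ?_⟩
    intro k hk
    rw [ihg k (by omega)]
    have hgd : (c.set m.toNat (PySem.List.pyGetD c m 0 + 1)).getD k 0 =
        c.getD k 0 + (if (k : Int) = m then 1 else 0) := by
      by_cases hkm : (k : Int) = m
      · have hkeq : k = m.toNat := by omega
        subst hkeq
        rw [List.getD_eq_getElem _ _ (by omega), List.getD_eq_getElem _ _ hk,
          List.getElem_set_self (by omega), if_pos hkm,
          PySem.List.pyGetD_eq_getElem c 0 hm0 hmlt]
      · have hne : m.toNat ≠ k := by omega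
        rw [List.getD_eq_getElem _ _ (by omega), List.getD_eq_getElem _ _ hk,
          List.getElem_set_ne hne, if_neg hkm]
        ring
    rw [hgd]
    by_cases hkm : (k : Int) = m
    · simp [hkm, hmns]
    · simp [hkm]

lemma pv_nodup_pyRange_pos (a b s : Int) (hs : 0 < s) : (PySem.List.pyRange a b s).Nodup := by
  rw [PySem.List.pyRange_of_pos a b hs]
  apply List.Nodup.map
  · intro x y hxy
    have : s * (x : Int) = s * (y : Int) := by linarith
    have := mul_left_cancel₀ (ne_of_gt hs) this
    exact_mod_cast this
  · exact List.nodup_range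

-- the whole sieve: index k accumulates one hit per processed d whose multiple list contains k
lemma pv_sieve (n : Int) : ∀ (ds : List Int) (c : List Int), (∀ d ∈ ds, 1 ≤ d) →
    (c.length : Int) = n + 1 →
    (ds.foldl (fun c d => (PySem.List.pyRange d (n + 1) d).foldl
      (fun c m => PySem.List.pySetD c m (PySem.List.pyGetD c m 0 + 1)) c) c).length = c.length ∧
    (∀ k : Nat, k < c.length →
      (ds.foldl (fun c d => (PySem.List.pyRange d (n + 1) d).foldl
        (fun c m => PySem.List.pySetD c m (PySem.List.pyGetD c m 0 + 1)) c) c).getD k 0 =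
        c.getD k 0 + (ds.countP (fun d => decide ((k : Int) ∈ PySem.List.pyRange d (n + 1) d)) : Nat)) := by
  intro ds
  induction ds with
  | nil => intro c _ _; exact ⟨rfl, by intro k hk; simp⟩
  | cons d ds ih =>
    intro c hds hcl
    have hd1 : 1 ≤ d := hds d (List.mem_cons_self)
    have hnd : (PySem.List.pyRange d (n + 1) d).Nodup := pv_nodup_pyRange_pos d (n + 1) d (by omega)
    have hin : ∀ m ∈ PySem.List.pyRange d (n + 1) d, 0 ≤ m ∧ m < (c.length : Int) := by
      intro m hm
      obtain ⟨h1, h2, _⟩ := (PySem.List.mem_pyRange_iff_of_pos (a := d) (b := n + 1) (s := d) (by omega) m).1 hm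
      exact ⟨by omega, by omega⟩
    obtain ⟨hl1, hg1⟩ := pv_incr_fold (PySem.List.pyRange d (n + 1) d) c hnd hin
    obtain ⟨hl2, hg2⟩ := ih ((PySem.List.pyRange d (n + 1) d).foldl
      (fun c m => PySem.List.pySetD c m (PySem.List.pyGetD c m 0 + 1)) c)
      (fun x hx => hds x (List.mem_cons_of_mem _ hx)) (by rw [hl1]; exact hcl)
    simp only [List.foldl_cons]
    refine ⟨by rw [hl2, hl1], ?_⟩
    intro k hk
    rw [hg2 k (by omega), hg1 k hk, List.countP_cons]
    by_cases hmem : (k : Int) ∈ PySem.List.pyRange d (n + 1) d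
    · simp [hmem]; ring
    · simp [hmem]

-- counting the d with k ∈ range(d, n+1, d) is the divisor count of k, for 1 ≤ k ≤ n
lemma pv_count_mult (n j : Int) (h1 : 1 ≤ j) (h2 : j ≤ n) :
    ((PySem.List.pyRange 1 (n + 1) 1).countP
      (fun d => decide (j ∈ PySem.List.pyRange d (n + 1) d)) : Int) = pvDC j := by
  unfold pvDC
  rw [PySem.List.pyRange_one_append 1 (j + 1) (n + 1) (by omega) (by omega), List.countP_append]
  have hupper : (PySem.List.pyRange (j + 1) (n + 1) 1).countP
      (fun d => decide (j ∈ PySem.List.pyRange d (n + 1) d)) = 0 := by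
    rw [List.countP_eq_zero]
    intro d hd
    rw [PySem.List.mem_pyRange_one] at hd
    simp only [decide_eq_true_eq]
    intro hmem
    obtain ⟨hle, _, _⟩ := (PySem.List.mem_pyRange_iff_of_pos (a := d) (b := n + 1) (s := d)
      (by omega) j).1 hmem
    omega
  have hlower : (PySem.List.pyRange 1 (j + 1) 1).countP
      (fun d => decide (j ∈ PySem.List.pyRange d (n + 1) d)) =
      (PySem.List.pyRange 1 (j + 1) 1).countP (fun i => PySem.Int.mod j i == 0) := by
    apply List.countP_congr
    intro d hd
    rw [PySem.List.mem_pyRange_one] at hd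
    have h0d : (0 : Int) < d := by omega
    have hiff : j ∈ PySem.List.pyRange d (n + 1) d ↔ d ∣ j := by
      rw [PySem.List.mem_pyRange_iff_of_pos (by omega) j]
      constructor
      · rintro ⟨_, _, hdvd⟩
        have : d ∣ (j - d) + d := Dvd.dvd.add hdvd dvd_rfl
        simpa using this
      · intro hdvd
        exact ⟨Int.le_of_dvd (by omega) hdvd, by omega, by simpa using Int.dvd_sub hdvd dvd_rfl⟩
    simp [hiff, beq_iff_eq, PySem.Int.mod_eq_zero_iff_dvd]
  rw [hupper, hlower]
  push_cast
  ring

-- summing the counter's multiplicities of values above v is counting prefix elements above v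
lemma pv_counter_sum (P : List Int) (v : Int) :
    ((((PySem.Dict.counter P).items).filter (fun p => decide (p.1 > v))).map (·.2)).sum =
      ((P.countP (fun y => decide (v < y)) : Nat) : Int) := by
  rw [PySem.Dict.items_counter, List.filter_map, List.map_map]
  have hf : (List.filter ((fun (p : Int × Int) => decide (p.1 > v)) ∘
      fun k => (k, ((List.count k P : Nat) : Int))) (PySem.Set.ofList P)) =
      (PySem.Set.ofList P).filter (fun k => decide (v < k)) := by
    apply List.filter_congr
    intro k _
    rfl
  rw [hf]
  have hm : ((fun (p : Int × Int) => p.2) ∘ fun k => (k, ((List.count k P : Nat) : Int))) =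
      (fun (m : Nat) => (m : Int)) ∘ (fun k => List.count k P) := rfl
  rw [hm, ← List.map_map, ← Nat.cast_list_sum]
  congr 1
  have hperm : (PySem.Set.ofList P).Perm P.dedup :=
    (List.perm_ext_iff_of_nodup (PySem.Set.nodup_ofList P) P.nodup_dedup).2
      (fun a => by rw [PySem.Set.mem_ofList, List.mem_dedup])
  rw [List.Perm.sum_eq (List.Perm.map _ (List.Perm.filter _ hperm))]
  exact List.sum_map_count_dedup_filter_eq_countP _ P

lemma pv_counter_snoc (P : List Int) (v : Int) :
    (PySem.Dict.counter P).insert v ((PySem.Dict.counter P).getD v 0 + 1) =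
      PySem.Dict.counter (P ++ [v]) := by
  conv_rhs => rw [← PySem.Dict.foldl_insert_getD_add_one_eq_counter]
  rw [List.foldl_append, PySem.Dict.foldl_insert_getD_add_one_eq_counter]
  simp [List.foldl_cons, List.foldl_nil]

-- B's single pass, related to the common specs pvZ and pvMC
lemma pv_foldB : ∀ (L P : List Int) (b c : Int),
    L.foldl (fun (st : Int × Int × PySem.Dict Int Int) v =>
      let w := (((PySem.Dict.items st.2.2).filter (fun p => decide (p.1 > v))).map (·.2)).sum
      if w > st.1 then (w, 1, st.2.2.insert v (st.2.2.getD v 0 + 1))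
      else if w = st.1 then (st.1, st.2.1 + 1, st.2.2.insert v (st.2.2.getD v 0 + 1))
      else (st.1, st.2.1, st.2.2.insert v (st.2.2.getD v 0 + 1)))
      (b, c, PySem.Dict.counter P) =
    (((pvZ P L).foldl pvMC (b, c)).1, ((pvZ P L).foldl pvMC (b, c)).2,
      PySem.Dict.counter (P ++ L)) := by
  intro L
  induction L with
  | nil => intro P b c; simp [pvZ]
  | cons v L ih =>
    intro P b c
    simp only [List.foldl_cons, pvZ]
    rw [pv_counter_sum P v, pv_counter_snoc P v]
    set W : Int := ((P.countP (fun y => decide (v < y)) : Nat) : Int) with hW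
    by_cases h1 : W > b
    · simp only [if_pos h1]
      rw [ih (P ++ [v]) W 1]
      simp [pvMC, h1, List.append_assoc]
    · simp only [if_neg h1]
      by_cases h2 : W = b
      · simp only [if_pos h2]
        rw [ih (P ++ [v]) b (c + 1)]
        simp [pvMC, h2, List.append_assoc]
      · simp only [if_neg h2]
        rw [ih (P ++ [v]) b c]
        simp [pvMC, h1, h2, List.append_assoc]

lemma pv_X_eq (n : Int) (h : 1 ≤ n) :
    PySem.List.slice ((PySem.List.pyRange 1 (n + 1) 1).foldl
      (fun c d => (PySem.List.pyRange d (n + 1) d).foldl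
        (fun c m => PySem.List.pySetD c m (PySem.List.pyGetD c m 0 + 1)) c)
      (List.replicate (n + 1).toNat (0 : Int))) (some 1) none =
    (PySem.List.pyRange 1 (n + 1) 1).map pvDC := by
  have hrep : (((List.replicate (n + 1).toNat (0 : Int)).length : Nat) : Int) = n + 1 := by
    simp; omega
  obtain ⟨hlen, hget⟩ := pv_sieve n (PySem.List.pyRange 1 (n + 1) 1)
    (List.replicate (n + 1).toNat (0 : Int))
    (fun d hd => ((PySem.List.mem_pyRange_one).1 hd).1) hrep
  rw [PySem.List.slice_from _ (by omega : (0 : Int) ≤ 1)]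
  apply List.ext_getElem
  · rw [List.length_drop, hlen, List.length_map, PySem.List.length_pyRange_one]
    simp; omega
  · intro k h1 h2
    rw [List.getElem_drop]
    have hk : k < n.toNat := by
      rw [List.length_map, PySem.List.length_pyRange_one] at h2; omega
    have hkc : (1 : Int).toNat + k < (List.replicate (n + 1).toNat (0 : Int)).length := by
      simp; omega
    rw [show ((PySem.List.pyRange 1 (n + 1) 1).foldl (fun c d =>
        (PySem.List.pyRange d (n + 1) d).foldl
          (fun c m => PySem.List.pySetD c m (PySem.List.pyGetD c m 0 + 1)) c)
        (List.replicate (n + 1).toNat (0 : Int)))[(1 : Int).toNat + k] =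
      ((PySem.List.pyRange 1 (n + 1) 1).foldl (fun c d =>
        (PySem.List.pyRange d (n + 1) d).foldl
          (fun c m => PySem.List.pySetD c m (PySem.List.pyGetD c m 0 + 1)) c)
        (List.replicate (n + 1).toNat (0 : Int))).getD ((1 : Int).toNat + k) 0 from
      (List.getD_eq_getElem _ _ (by rw [hlen]; simpa using hkc)).symm]
    rw [hget ((1 : Int).toNat + k) (by simpa using hkc)]
    have hgr : (List.replicate (n + 1).toNat (0 : Int)).getD ((1 : Int).toNat + k) 0 = 0 := by
      rw [List.getD_eq_getElem _ _ hkc, List.getElem_replicate]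
    rw [hgr]
    have hcast : (((1 : Int).toNat + k : Nat) : Int) = 1 + (k : Int) := by simp
    rw [hcast]
    have hmap : ((PySem.List.pyRange 1 (n + 1) 1).map pvDC)[k] =
        pvDC ((PySem.List.pyRange 1 (n + 1) 1)[k]'(by
          rw [PySem.List.length_pyRange_one]; omega)) := List.getElem_map _
    rw [hmap, PySem.List.getElem_pyRange_one]
    rw [← pv_count_mult n (1 + (k : Int)) (by omega) (by omega)]
    ring

-- ===== VERDICT (by name: the statement is the Claim_ definition above) =====
theorem solution_spec : Claim_equal_solution := by
  intro n _ hpre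
  unfold Pre_solution at hpre
  unfold Spec_solution
  have hX : (PySem.List.pyRange 1 (n + 1) 1).foldl (fun acc j => acc ++ [pvD j]) [] =
      (PySem.List.pyRange 1 (n + 1) 1).map pvDC := by
    rw [PySem.List.foldl_append_singleton_eq_map]
    simp only [List.nil_append]
    apply List.map_congr_left
    intro j hj
    rw [PySem.List.mem_pyRange_one] at hj
    rw [pvD_eq j (by omega), pvDivLen_eq]
  have hXlen : ((PySem.List.pyRange 1 (n + 1) 1).map pvDC).length = n.toNat := by
    rw [List.length_map, PySem.List.length_pyRange_one]; omega
  have hZne : pvZ [] ((PySem.List.pyRange 1 (n + 1) 1).map pvDC) ≠ [] := by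
    intro h
    have := pvZ_length ((PySem.List.pyRange 1 (n + 1) 1).map pvDC) []
    rw [h, hXlen] at this
    simp at this
    omega
  have hZnn := pvZ_nonneg ((PySem.List.pyRange 1 (n + 1) 1).map pvDC) []
  have hZ : ∀ X : List Int,
      (X.foldl (fun (p : List Int × Int) i => (p.1 ++ [pvW X i p.2], p.2 + 1)) ([], 0)).1
        = pvZ [] X := by
    intro X
    rw [pv_foldA X X [] 0]
    simp only [List.nil_append]
    have h0 : (0 : Int) = ((([] : List Int).length : Nat) : Int) := by simp
    rw [h0]
    simpa using pv_enum_Z X []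
  simp only [solution, solution_alt]
  rw [hX, hZ, pv_X_eq n hpre,
    pv_final_A (pvZ [] ((PySem.List.pyRange 1 (n + 1) 1).map pvDC)) hZne hZnn,
    show (PySem.Dict.empty : PySem.Dict Int Int) = PySem.Dict.counter [] from rfl,
    pv_foldB ((PySem.List.pyRange 1 (n + 1) 1).map pvDC) [] (-1) 0, pv_stream]
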